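-- pv_equiv track=rewrite | github.com/wael159/python_training | common_python_questions/nth_highest_key.py | nth_highest_key_followup1
-- ===== SOURCE A (Python) =====
-- def nth_highest_key_followup1(data=None, n=1):
--     if data is None:
--         data = {'a': 10, 'b': 20, 'c': 30, 'd': 20, 'e': 30}
--     if n < 1:
--         return []
--
--     unique_values = sorted(set(data.values()), reverse=True)
--     if n > len(unique_values):
--         return []
--
--     nth_value = unique_values[n - 1]
--     return sorted([k for k, v in data.items() if v == nth_value])
-- ===== SOURCE B (Python) =====
-- def nth_highest_key_followup1(data=None, n=1):
--     if data is None: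
--         data = {'a': 10, 'b': 20, 'c': 30, 'd': 20, 'e': 30}
--     if n < 1:
--         return []
--     # Selection by repeated max-extraction: peel off the highest value n-1 times,
--     # then report the keys carrying the current maximum. No sort of the values,
--     # no set, no index structure.
--     items = list(data.items())
--     while items:
--         m = max(v for _, v in items)
--         if n == 1:
--             return sorted(k for k, v in items if v == m)
--         items = [(k, v) for k, v in items if v != m]
--         n -= 1
--     return []
-- ===== Notes on version B (the rewrite author's own statement) =====
-- stated objective: alternative
-- what changed: B selects the nth-highest value by repeated max-extraction (peel the items with the current maximum value n-1 times, then sort the surviving top keys) instead of A's sort of the distinct-value set followed by a rescan of the items.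
import Mathlib
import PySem

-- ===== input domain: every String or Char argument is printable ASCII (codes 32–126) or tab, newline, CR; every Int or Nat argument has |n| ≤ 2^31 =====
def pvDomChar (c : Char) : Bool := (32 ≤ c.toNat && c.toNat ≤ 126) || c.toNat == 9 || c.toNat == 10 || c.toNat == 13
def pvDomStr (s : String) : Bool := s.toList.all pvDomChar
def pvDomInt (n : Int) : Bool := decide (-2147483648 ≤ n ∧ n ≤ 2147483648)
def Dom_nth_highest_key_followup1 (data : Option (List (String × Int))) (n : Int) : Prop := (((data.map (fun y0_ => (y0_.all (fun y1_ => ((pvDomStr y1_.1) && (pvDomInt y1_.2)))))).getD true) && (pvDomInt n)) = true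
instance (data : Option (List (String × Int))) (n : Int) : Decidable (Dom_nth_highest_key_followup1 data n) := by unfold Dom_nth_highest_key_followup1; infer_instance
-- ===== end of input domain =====

-- B replaces A's sort-of-the-distinct-value-set-plus-rescan with repeated max-extraction
-- (peel off the items carrying the top value n-1 times, then sort the surviving top keys);
-- same result, proved equal (objective: alternative).

-- ===== PORT A =====
def nth_highest_key_followup1 (data : Option (List (String × Int))) (n : Int) : List String :=
  let items := data.getD [("a", 10), ("b", 20), ("c", 30), ("d", 20), ("e", 30)]
  if n < 1 then []
  else
    let unique_values := PySem.List.sorted (PySem.Set.ofList (items.map (·.2))) (fun x => x) true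
    if n > PySem.List.len unique_values then []
    else
      let nth_value := PySem.List.pyGetD unique_values (n - 1) 0
      PySem.List.sorted ((items.filter (fun p => p.2 == nth_value)).map (·.1)) (fun x => x) false

-- ===== PORT B =====
-- m = max(v for _, v in items): the running-max loop over the values
def pvMaxVal (x : String × Int) (xs : List (String × Int)) : Int :=
  (xs.map (·.2)).foldl max x.2

-- termination of the peel loop: the element carrying the maximal value is dropped by the filter
lemma pvPeel_term (x : String × Int) (xs : List (String × Int)) :
    ((x :: xs).filter (fun p => p.2 != pvMaxVal x xs)).length < (x :: xs).length := by
  rcases PySem.List.foldl_max_mem (xs.map (·.2)) x.2 with h | h <;> simp only [pvMaxVal]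
  · refine List.length_filter_lt_length_iff_exists.mpr ⟨x, List.mem_cons_self, by simp [h]⟩
  · rcases List.mem_map.mp h with ⟨p, hp, hpv⟩
    exact List.length_filter_lt_length_iff_exists.mpr ⟨p, List.mem_cons_of_mem _ hp, by simp [hpv]⟩

-- the 'while items:' loop of Source B
def pvPeel (items : List (String × Int)) (n : Int) : List String :=
  match items with
  | [] => []
  | x :: xs =>
    let m := pvMaxVal x xs
    if n == 1 then
      PySem.List.sorted (((x :: xs).filter (fun p => p.2 == m)).map (·.1)) (fun y => y) false
    else
      pvPeel ((x :: xs).filter (fun p => p.2 != m)) (n - 1)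
termination_by items.length
decreasing_by exact pvPeel_term x xs

def nth_highest_key_followup1_alt (data : Option (List (String × Int))) (n : Int) : List String :=
  let items := data.getD [("a", 10), ("b", 20), ("c", 30), ("d", 20), ("e", 30)]
  if n < 1 then []
  else pvPeel items n

-- ===== PRECONDITION & SPEC =====
def Spec_nth_highest_key_followup1 (data : Option (List (String × Int))) (n : Int) (out : List String) : Prop := out = nth_highest_key_followup1_alt data n
instance (data : Option (List (String × Int))) (n : Int) (out : List String) : Decidable (Spec_nth_highest_key_followup1 data n out) := by unfold Spec_nth_highest_key_followup1; infer_instance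

-- ===== CLAIM (what is proved, stated in full; the proofs are below) =====
def Claim_equal_nth_highest_key_followup1 : Prop := ∀ (data : Option (List (String × Int))) (n : Int), Dom_nth_highest_key_followup1 data n → Spec_nth_highest_key_followup1 data n (nth_highest_key_followup1 data n)

-- ===== LEMMAS AND PROOFS =====

-- A's core (the else-branch of A's port), named for the induction
def pvACore (items : List (String × Int)) (n : Int) : List String :=
  let unique_values := PySem.List.sorted (PySem.Set.ofList (items.map (·.2))) (fun x => x) true
  if n > PySem.List.len unique_values then []
  else
    let nth_value := PySem.List.pyGetD unique_values (n - 1) 0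
    PySem.List.sorted ((items.filter (fun p => p.2 == nth_value)).map (·.1)) (fun x => x) false

-- descending sort of set(vs) = the maximum consed on the descending sort of the rest
lemma sorted_set_desc (vs : List Int) (m : Int) (hm : m ∈ vs) (hmax : ∀ a ∈ vs, a ≤ m) :
    PySem.List.sorted (PySem.Set.ofList vs) (fun y => y) true
      = m :: PySem.List.sorted (PySem.Set.ofList (vs.filter (fun v => v != m))) (fun y => y) true := by
  have hstep : ∀ a, a ∈ PySem.List.sorted (PySem.Set.ofList (vs.filter (fun v => v != m))) (fun y => y) true ↔ (a ∈ vs ∧ a ≠ m) := by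
    intro a
    simp [PySem.List.mem_sorted, PySem.Set.mem_ofList, List.mem_filter]
  have htnd : (PySem.List.sorted (PySem.Set.ofList (vs.filter (fun v => v != m))) (fun y => y) true).Nodup :=
    (PySem.List.sorted_perm _ _ _).nodup_iff.mpr (PySem.Set.nodup_ofList _)
  have hpair := PySem.List.sorted_pairwise_rev (PySem.Set.ofList (vs.filter (fun v => v != m))) (fun y => y)
  have tlt : (PySem.List.sorted (PySem.Set.ofList (vs.filter (fun v => v != m))) (fun y => y) true).Pairwise (fun a b => b < a) :=
    (hpair.and htnd).imp (fun h => lt_of_le_of_ne h.1 h.2.symm)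
  have hm_t : m ∉ PySem.List.sorted (PySem.Set.ofList (vs.filter (fun v => v != m))) (fun y => y) true :=
    fun h => ((hstep m).1 h).2 rfl
  have hperm : (m :: PySem.List.sorted (PySem.Set.ofList (vs.filter (fun v => v != m))) (fun y => y) true).Perm (PySem.Set.ofList vs) := by
    refine (List.perm_ext_iff_of_nodup (List.nodup_cons.mpr ⟨hm_t, htnd⟩) (PySem.Set.nodup_ofList _)).mpr ?_
    intro a
    constructor
    · intro h
      rcases List.mem_cons.mp h with rfl | h
      · exact (PySem.Set.mem_ofList _ _).mpr hm
      · exact (PySem.Set.mem_ofList _ _).mpr ((hstep a).1 h).1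
    · intro h
      by_cases ha : a = m
      · subst ha; exact List.mem_cons_self
      · exact List.mem_cons_of_mem _ ((hstep a).2 ⟨(PySem.Set.mem_ofList _ _).mp h, ha⟩)
  have hpw : (m :: PySem.List.sorted (PySem.Set.ofList (vs.filter (fun v => v != m))) (fun y => y) true).Pairwise (fun a b => b < a) :=
    List.pairwise_cons.mpr ⟨fun b hb => lt_of_le_of_ne (hmax b ((hstep b).1 hb).1) ((hstep b).1 hb).2, tlt⟩
  exact PySem.List.sorted_rev_eq_of_perm_of_pairwise_gt _ _ _ hperm hpw

-- a filter for one value c ≠ m passes unchanged through the removal of the value-m items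
lemma filter_through_ne (l : List (String × Int)) (c m : Int) (h : c ≠ m) :
    l.filter (fun p => p.2 == c) = (l.filter (fun p => p.2 != m)).filter (fun p => p.2 == c) := by
  rw [List.filter_filter]
  apply List.filter_congr
  intro p _
  by_cases hc : p.2 = c
  · simp [hc, h]
  · simp [hc]

-- the values of the peeled list are the filtered values
lemma map_filter_vals (l : List (String × Int)) (m : Int) :
    (l.map (·.2)).filter (fun v => v != m) = (l.filter (fun p => p.2 != m)).map (·.2) := by
  rw [List.filter_map]
  rfl

-- the peel loop computes A's "nth distinct value then rescan" result
lemma pvPeel_eq (N : Nat) : ∀ items : List (String × Int), items.length ≤ N →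
    ∀ n : Int, 1 ≤ n → pvPeel items n = pvACore items n := by
  induction N with
  | zero =>
    intro items hlen n hn
    match items with
    | [] =>
      simp only [pvPeel]
      have hl : PySem.List.len (PySem.List.sorted (PySem.Set.ofList (([] : List (String × Int)).map (·.2))) (fun x => x) true) = 0 := by
        rw [PySem.List.len_eq, PySem.List.length_sorted]; rfl
      simp only [pvACore]
      rw [if_pos (by rw [hl]; omega)]
  | succ N ih =>
    intro items hlen n hn
    match items with
    | [] =>
      simp only [pvPeel]
      have hl : PySem.List.len (PySem.List.sorted (PySem.Set.ofList (([] : List (String × Int)).map (·.2))) (fun x => x) true) = 0 := by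
        rw [PySem.List.len_eq, PySem.List.length_sorted]; rfl
      simp only [pvACore]
      rw [if_pos (by rw [hl]; omega)]
    | x :: xs =>
      have hmem : pvMaxVal x xs ∈ (x :: xs).map (·.2) := by
        simp only [List.map_cons]
        rcases PySem.List.foldl_max_mem (xs.map (·.2)) x.2 with h | h
        · rw [pvMaxVal, h]; exact List.mem_cons_self
        · exact List.mem_cons_of_mem _ h
      have hmax : ∀ a ∈ (x :: xs).map (·.2), a ≤ pvMaxVal x xs := by
        intro a ha
        simp only [List.map_cons, List.mem_cons] at ha
        rcases ha with rfl | ha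
        · exact (PySem.List.le_foldl_max (xs.map (·.2)) x.2).1
        · exact (PySem.List.le_foldl_max (xs.map (·.2)) x.2).2 a ha
      have hdesc := sorted_set_desc ((x :: xs).map (·.2)) (pvMaxVal x xs) hmem hmax
      rw [map_filter_vals] at hdesc
      have huv'mem : ∀ a ∈ PySem.List.sorted (PySem.Set.ofList (((x :: xs).filter (fun p => p.2 != pvMaxVal x xs)).map (·.2))) (fun y => y) true, a ≠ pvMaxVal x xs := by
        intro a ha
        rw [PySem.List.mem_sorted, PySem.Set.mem_ofList] at ha
        rcases List.mem_map.mp ha with ⟨p, hp, rfl⟩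
        have := (List.mem_filter.mp hp).2
        simpa using this
      by_cases h1 : n = 1
      · subst h1
        simp only [pvPeel]
        rw [if_pos (show ((1 : Int) == (1 : Int)) = true by decide)]
        simp only [pvACore]
        rw [hdesc]
        rw [if_neg (by rw [PySem.List.len_eq]; simp only [List.length_cons]; push_cast; omega)]
        norm_num [PySem.List.pyGetD_zero_cons]
      · have h2 : 2 ≤ n := by omega
        simp only [pvPeel]
        rw [if_neg (by simp [h1] : ¬ ((n == 1) = true))]
        have hlt : ((x :: xs).filter (fun p => p.2 != pvMaxVal x xs)).length ≤ N := by
          have := pvPeel_term x xs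
          simp only [List.length_cons] at this hlen ⊢
          omega
        rw [ih _ hlt (n - 1) (by omega)]
        simp only [pvACore]
        rw [hdesc]
        set uv' := PySem.List.sorted (PySem.Set.ofList (((x :: xs).filter (fun p => p.2 != pvMaxVal x xs)).map (·.2))) (fun y => y) true with huv'def
        have hL : PySem.List.len uv' = (uv'.length : Int) := PySem.List.len_eq uv'
        have hlen' : PySem.List.len (pvMaxVal x xs :: uv') = (uv'.length : Int) + 1 := by
          rw [PySem.List.len_eq]; simp only [List.length_cons]; push_cast; ring
        by_cases hbig : n > (uv'.length : Int) + 1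
        · rw [if_pos (by rw [hL]; omega), if_pos (by rw [hlen']; omega)]
        · rw [if_neg (by rw [hL]; omega), if_neg (by rw [hlen']; omega)]
          have hr2 : n - 1 - 1 < (uv'.length : Int) := by omega
          have hr2' : (n - 1 - 1).toNat < uv'.length := by omega
          have hidx : PySem.List.pyGetD (pvMaxVal x xs :: uv') (n - 1) 0 = PySem.List.pyGetD uv' (n - 1 - 1) 0 := by
            rw [PySem.List.pyGetD_eq_getElem _ _ (by omega) (by simp only [List.length_cons]; push_cast; omega),
                PySem.List.pyGetD_eq_getElem _ _ (by omega) hr2]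
            have hsh : (n - 1).toNat = (n - 1 - 1).toNat + 1 := by omega
            simp only [hsh, List.getElem_cons_succ]
          rw [hidx]
          have hcne : PySem.List.pyGetD uv' (n - 1 - 1) 0 ≠ pvMaxVal x xs := by
            apply huv'mem
            rw [PySem.List.pyGetD_eq_getElem _ _ (by omega) hr2]
            exact List.getElem_mem hr2'
          rw [← filter_through_ne _ _ _ hcne]

-- ===== VERDICT (by name: the statement is the Claim_ definition above) =====
theorem nth_highest_key_followup1_spec : Claim_equal_nth_highest_key_followup1 := by
  intro data n _
  unfold Spec_nth_highest_key_followup1 nth_highest_key_followup1 nth_highest_key_followup1_alt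
  by_cases h : n < 1
  · simp only [if_pos h]
  · show (if n < 1 then [] else pvACore (data.getD [("a", 10), ("b", 20), ("c", 30), ("d", 20), ("e", 30)]) n)
        = (if n < 1 then [] else pvPeel (data.getD [("a", 10), ("b", 20), ("c", 30), ("d", 20), ("e", 30)]) n)
    rw [if_neg h, if_neg h]
    exact (pvPeel_eq _ _ le_rfl n (by omega)).symm
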